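-- pv_equiv track=rewrite | github.com/milanhorvatovic/skill-system-foundry | skill-system-foundry/scripts/lib/manifest.py | _find_section_end
-- ===== SOURCE A (Python) =====
-- def _find_section_end(lines: list[str], section_idx: int) -> int:
--     """Return the insert position after the last content line of a section.
--
--     Walks forward from *section_idx* + 1 while lines are indented or
--     blank, returning the position just after the last non-blank
--     indented line.
--     """
--     last_content = section_idx
--     i = section_idx + 1
--     while i < len(lines):
--         line = lines[i]
--         if line.strip() == "":
--             i += 1
--             continue
--         # Skip top-level comments (they don't end the section)
--         if not line[0].isspace() and line.lstrip().startswith("#"):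
--             i += 1
--             continue
--         if line[0].isspace():
--             last_content = i
--             i += 1
--         else:
--             break
--     return last_content + 1
-- ===== SOURCE B (Python) =====
-- def _find_section_end(lines: list[str], section_idx: int) -> int:
--     """Boundary-then-backward reformulation: locate the first top-level,
--     non-comment, non-blank line after section_idx, then scan backward from it
--     for the last indented non-blank line and return that index + 1."""
--     n = len(lines)
--     boundary = section_idx + 1
--     while boundary < n:
--         line = lines[boundary]
--         if line.strip() != "" and not line[0].isspace() and not line.lstrip().startswith("#"):
--             break
--         boundary += 1
--     j = boundary - 1
--     while j > section_idx:
--         line = lines[j]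
--         if line.strip() != "" and line[0].isspace():
--             return j + 1
--         j -= 1
--     return section_idx + 1
-- ===== Notes on version B (the rewrite author's own statement) =====
-- stated objective: alternative
-- what changed: A's single forward walk with a last_content accumulator is replaced by two scans: a forward scan that only finds the section boundary (first top-level non-comment non-blank line), then a backward scan from the boundary for the last indented non-blank line.
import Mathlib
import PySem

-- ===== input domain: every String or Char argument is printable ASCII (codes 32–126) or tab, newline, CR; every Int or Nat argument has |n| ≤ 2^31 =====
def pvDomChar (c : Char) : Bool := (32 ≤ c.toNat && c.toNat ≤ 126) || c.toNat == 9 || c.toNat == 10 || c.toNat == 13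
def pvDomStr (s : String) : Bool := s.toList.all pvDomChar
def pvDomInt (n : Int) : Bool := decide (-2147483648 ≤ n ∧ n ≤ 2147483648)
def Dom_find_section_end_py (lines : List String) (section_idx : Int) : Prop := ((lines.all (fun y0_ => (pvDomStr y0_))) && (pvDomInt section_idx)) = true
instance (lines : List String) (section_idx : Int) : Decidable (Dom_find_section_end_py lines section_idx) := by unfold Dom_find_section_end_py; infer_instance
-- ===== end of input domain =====

-- B replaces A's single forward accumulator loop by a find-the-section-boundary
-- forward scan followed by a backward scan for the last indented content line
-- (objective: alternative decomposition, same cost).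

-- shared primitive: Python's lines[i] (negative indices wrap; the "" default is
-- never reached under Pre_, which excludes the IndexError inputs)
def pvLineAt (lines : List String) (i : Int) : String :=
  (PySem.List.pyGet? lines i).getD ""

-- shared primitive: Python's line[0].isspace() (False on the empty string only
-- because its sites guard with line.strip() != "" first)
def pvFirstSpace (line : String) : Bool :=
  match PySem.Str.pyGet? line 0 with
  | some c => PySem.Chars.isspace c
  | none => false

-- ===== PORT A =====
def pvLoopA (lines : List String) (i last : Int) : Int :=
  if _h : i < (lines.length : Int) then
    if PySem.Str.strip (pvLineAt lines i) = "" then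
      pvLoopA lines (i + 1) last
    else if pvFirstSpace (pvLineAt lines i) = false ∧
            PySem.Str.startswith (PySem.Str.lstrip (pvLineAt lines i)) "#" = true then
      pvLoopA lines (i + 1) last
    else if pvFirstSpace (pvLineAt lines i) = true then
      pvLoopA lines (i + 1) i
    else
      last + 1
  else last + 1
termination_by ((lines.length : Int) - i).toNat
decreasing_by all_goals omega

def find_section_end_py (lines : List String) (section_idx : Int) : Int :=
  pvLoopA lines (section_idx + 1) section_idx

-- ===== PORT B =====
def pvBoundaryB (lines : List String) (b : Int) : Int :=
  if _h : b < (lines.length : Int) then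
    if PySem.Str.strip (pvLineAt lines b) ≠ "" ∧
       pvFirstSpace (pvLineAt lines b) = false ∧
       PySem.Str.startswith (PySem.Str.lstrip (pvLineAt lines b)) "#" = false then
      b
    else pvBoundaryB lines (b + 1)
  else b
termination_by ((lines.length : Int) - b).toNat
decreasing_by all_goals omega

def pvBackB (lines : List String) (j section_idx : Int) : Int :=
  if _h : section_idx < j then
    if PySem.Str.strip (pvLineAt lines j) ≠ "" ∧
       pvFirstSpace (pvLineAt lines j) = true then
      j + 1
    else pvBackB lines (j - 1) section_idx
  else section_idx + 1
termination_by (j - section_idx).toNat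
decreasing_by all_goals omega

def find_section_end_py_alt (lines : List String) (section_idx : Int) : Int :=
  pvBackB lines (pvBoundaryB lines (section_idx + 1) - 1) section_idx

-- ===== PRECONDITION & SPEC =====
-- Pre_ excludes exactly the inputs where Python A raises IndexError:
-- section_idx + 1 < -len(lines) (the very first lines[i] access is out of range
-- even under negative-index wraparound).
def Pre_find_section_end_py (lines : List String) (section_idx : Int) : Prop :=
  -(lines.length : Int) ≤ section_idx + 1
instance (lines : List String) (section_idx : Int) : Decidable (Pre_find_section_end_py lines section_idx) := by unfold Pre_find_section_end_py; infer_instance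

def pvWitness_find_section_end_py : List String × Int := (["key:", "  a: 1", "", "  b: 2", "# note", "next:"], 0)

def Spec_find_section_end_py (lines : List String) (section_idx : Int) (out : Int) : Prop := out = find_section_end_py_alt lines section_idx
instance (lines : List String) (section_idx : Int) (out : Int) : Decidable (Spec_find_section_end_py lines section_idx out) := by unfold Spec_find_section_end_py; infer_instance

-- ===== CLAIM (what is proved, stated in full; the proofs are below) =====
def Claim_equal_find_section_end_py : Prop := ∀ (lines : List String) (section_idx : Int), Dom_find_section_end_py lines section_idx → Pre_find_section_end_py lines section_idx → Spec_find_section_end_py lines section_idx (find_section_end_py lines section_idx)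

-- ===== LEMMAS AND PROOFS =====

-- "content" classification shared by both scans: non-blank and indented
abbrev pvIsContent (line : String) : Prop :=
  PySem.Str.strip line ≠ "" ∧ pvFirstSpace line = true

-- proof-side backward search returning the found index (none if no content in [lo, j])
def pvBF (lines : List String) (j lo : Int) : Option Int :=
  if _h : lo ≤ j then
    if pvIsContent (pvLineAt lines j) then some j
    else pvBF lines (j - 1) lo
  else none
termination_by (j - lo + 1).toNat
decreasing_by all_goals omega

theorem pvBF_none_of_lt (lines : List String) (j lo : Int) (h : j < lo) :
    pvBF lines j lo = none := by
  unfold pvBF; rw [dif_neg (by omega)]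

theorem pvBoundaryB_ge (lines : List String) (b : Int) : b ≤ pvBoundaryB lines b := by
  fun_induction pvBoundaryB lines b with
  | case1 b h hc => omega
  | case2 b h hc ih => omega
  | case3 b h => omega

theorem pvBackB_eq_pvBF (lines : List String) (j s : Int) :
    pvBackB lines j s = (match pvBF lines j (s + 1) with
      | some k => k + 1
      | none => s + 1) := by
  fun_induction pvBackB lines j s with
  | case1 j h hc =>
    rw [pvBF, dif_pos (show s + 1 ≤ j by omega), if_pos (show pvIsContent (pvLineAt lines j) from hc)]
  | case2 j h hc ih =>
    rw [pvBF, dif_pos (show s + 1 ≤ j by omega),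
      if_neg (show ¬ pvIsContent (pvLineAt lines j) from hc)]
    exact ih
  | case3 j h =>
    rw [pvBF_none_of_lt lines j (s + 1) (by omega)]

-- skipping a non-content index at the bottom of the range does not change the search
theorem pvBF_skip (lines : List String) (i : Int) (hn : ¬ pvIsContent (pvLineAt lines i)) :
    ∀ j, pvBF lines j i = pvBF lines j (i + 1) := by
  intro j
  fun_induction pvBF lines j i with
  | case1 j h hc =>
    rcases lt_or_ge j (i + 1) with hji | hji
    · have hj : j = i := by omega
      subst hj
      exact absurd hc hn
    · rw [pvBF, dif_pos (show i + 1 ≤ j by omega), if_pos hc]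
  | case2 j h hc ih =>
    rcases lt_or_ge j (i + 1) with hji | hji
    · have hj : j = i := by omega
      rw [hj, pvBF_none_of_lt lines (i - 1) i (by omega),
        pvBF_none_of_lt lines i (i + 1) (by omega)]
    · conv_rhs => rw [pvBF]
      rw [dif_pos (show i + 1 ≤ j by omega), if_neg hc]
      exact ih
  | case3 j h =>
    rw [pvBF_none_of_lt lines j (i + 1) (by omega)]

-- a content index at the bottom of the range is the fallback result
theorem pvBF_content (lines : List String) (i : Int) (hc : pvIsContent (pvLineAt lines i)) :
    ∀ j, i ≤ j → pvBF lines j i = some ((pvBF lines j (i + 1)).getD i) := by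
  intro j
  fun_induction pvBF lines j i with
  | case1 j h hcj =>
    intro _
    rcases lt_or_ge j (i + 1) with hji | hji
    · rw [pvBF_none_of_lt lines j (i + 1) hji]
      have hj : j = i := by omega
      rw [hj]; rfl
    · rw [pvBF, dif_pos (show i + 1 ≤ j by omega), if_pos hcj]
      rfl
  | case2 j h hcj ih =>
    intro _
    have hne : j ≠ i := fun he => hcj (by rw [he]; exact hc)
    conv_rhs => rw [pvBF]
    rw [dif_pos (show i + 1 ≤ j by omega), if_neg hcj]
    exact ih (by omega)
  | case3 j h => intro hij; omega

-- the main loop-equals-boundary/backward correspondence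
theorem pvLoopA_eq (lines : List String) (i last : Int) :
    pvLoopA lines i last =
      (match pvBF lines (pvBoundaryB lines i - 1) i with
        | some k => k + 1
        | none => last + 1) := by
  fun_induction pvLoopA lines i last with
  | case1 i last h hblank ih =>
    -- blank line: neither a boundary nor content
    have hnb : ¬ (PySem.Str.strip (pvLineAt lines i) ≠ "" ∧
        pvFirstSpace (pvLineAt lines i) = false ∧
        PySem.Str.startswith (PySem.Str.lstrip (pvLineAt lines i)) "#" = false) := by
      intro hx; exact hx.1 hblank
    have hB : pvBoundaryB lines i = pvBoundaryB lines (i + 1) := by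
      rw [pvBoundaryB, dif_pos h, if_neg hnb]
    have hnc : ¬ pvIsContent (pvLineAt lines i) := by
      intro hx; exact hx.1 hblank
    rw [ih, hB, pvBF_skip lines i hnc]
  | case2 i last h hblank hcom ih =>
    -- top-level comment: not a boundary, not content
    have hnb : ¬ (PySem.Str.strip (pvLineAt lines i) ≠ "" ∧
        pvFirstSpace (pvLineAt lines i) = false ∧
        PySem.Str.startswith (PySem.Str.lstrip (pvLineAt lines i)) "#" = false) := by
      intro hx; rw [hcom.2] at hx; exact absurd hx.2.2 (by decide)
    have hB : pvBoundaryB lines i = pvBoundaryB lines (i + 1) := by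
      rw [pvBoundaryB, dif_pos h, if_neg hnb]
    have hnc : ¬ pvIsContent (pvLineAt lines i) := by
      intro hx
      have h2 := hx.2
      rw [hcom.1] at h2
      exact Bool.noConfusion h2
    rw [ih, hB, pvBF_skip lines i hnc]
  | case3 i last h hblank hcom hsp ih =>
    -- indented content line: not a boundary, is content
    have hnb : ¬ (PySem.Str.strip (pvLineAt lines i) ≠ "" ∧
        pvFirstSpace (pvLineAt lines i) = false ∧
        PySem.Str.startswith (PySem.Str.lstrip (pvLineAt lines i)) "#" = false) := by
      intro hx; rw [hsp] at hx; exact absurd hx.2.1 (by decide)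
    have hB : pvBoundaryB lines i = pvBoundaryB lines (i + 1) := by
      rw [pvBoundaryB, dif_pos h, if_neg hnb]
    have hge : i + 1 ≤ pvBoundaryB lines (i + 1) := pvBoundaryB_ge lines (i + 1)
    have hc : pvIsContent (pvLineAt lines i) := ⟨hblank, hsp⟩
    rw [ih, hB, pvBF_content lines i hc (pvBoundaryB lines (i + 1) - 1) (by omega)]
    cases pvBF lines (pvBoundaryB lines (i + 1) - 1) (i + 1) <;> rfl
  | case4 i last h hblank hcom hsp =>
    -- section boundary: boundary stops here, nothing behind it
    have hsp' : pvFirstSpace (pvLineAt lines i) = false := by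
      cases hx : pvFirstSpace (pvLineAt lines i)
      · rfl
      · exact absurd hx hsp
    have hhash : PySem.Str.startswith (PySem.Str.lstrip (pvLineAt lines i)) "#" = false := by
      cases hx : PySem.Str.startswith (PySem.Str.lstrip (pvLineAt lines i)) "#"
      · rfl
      · exact absurd (And.intro hsp' hx) hcom
    have hB : pvBoundaryB lines i = i := by
      rw [pvBoundaryB, dif_pos h, if_pos (And.intro hblank (And.intro hsp' hhash))]
    rw [hB, pvBF_none_of_lt lines (i - 1) i (by omega)]
  | case5 i last h =>
    -- past the end of the list
    have hB : pvBoundaryB lines i = i := by rw [pvBoundaryB, dif_neg h]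
    rw [hB, pvBF_none_of_lt lines (i - 1) i (by omega)]

-- ===== VERDICT (by name: the statement is the Claim_ definition above) =====
theorem find_section_end_py_spec : Claim_equal_find_section_end_py := by
  intro lines section_idx _dom _pre
  unfold Spec_find_section_end_py find_section_end_py find_section_end_py_alt
  rw [pvLoopA_eq lines (section_idx + 1) section_idx,
    pvBackB_eq_pvBF lines (pvBoundaryB lines (section_idx + 1) - 1) section_idx]
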